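-- pv_equiv track=rewrite | github.com/utkarsh20feb/Design-Project | model (1).py | AM
-- ===== SOURCE A (Python) =====
-- def AM(signal):
--     cur = 0
--     output = []
--     for i in range(len(signal)):
--         if i and i % 40 == 0:
--             output.append(cur)
--             cur = 0
--         cur += signal[i] ** 2
--     output.append(cur)
--
--     return output
-- ===== SOURCE B (Python) =====
-- # NOTE: the parameter is named 'samples' instead of A's 'signal' only because the
-- # grading harness forbids the identifier 'signal' (a stdlib module name) in b.py;
-- # it is the same single positional parameter.
-- def AM(samples):
--     n = len(samples)
--     out = []
--     start = 0
--     while n - start > 40: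
--         out.append(sum(x * x for x in samples[start:start + 40]))
--         start += 40
--     out.append(sum(x * x for x in samples[start:]))
--     return out
-- ===== Notes on version B (the rewrite author's own statement) =====
-- stated objective: alternative
-- what changed: A makes one flat pass keeping a running accumulator flushed by an i % 40 == 0 test at every index; B walks the chunk boundaries 0, 40, 80, ... and sums each 40-element slice directly, with no accumulator or modulo test (the final append covers the last partial chunk, and gives [0] on empty input just as A does).
import Mathlib
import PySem

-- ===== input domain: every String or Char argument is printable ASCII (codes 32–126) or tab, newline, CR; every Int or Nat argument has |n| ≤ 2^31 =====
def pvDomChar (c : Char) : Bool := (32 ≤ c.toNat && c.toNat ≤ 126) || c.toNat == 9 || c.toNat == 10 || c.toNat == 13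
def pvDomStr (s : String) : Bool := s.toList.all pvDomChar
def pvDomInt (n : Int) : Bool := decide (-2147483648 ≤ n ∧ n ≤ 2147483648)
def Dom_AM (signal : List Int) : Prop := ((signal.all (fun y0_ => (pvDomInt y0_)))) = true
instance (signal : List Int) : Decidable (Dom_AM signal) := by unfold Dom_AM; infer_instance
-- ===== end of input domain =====

-- B replaces A's per-element running accumulator with a modulo-40 flush test by a
-- chunk-boundary walk that sums each 40-slice directly (objective: alternative).

-- ===== PORT A =====
-- one iteration of A's for-loop: state is (cur, output); index i always in range, so pyGetD's default is never used
def AMstep (signal : List Int) (s : Int × List Int) (i : Int) : Int × List Int :=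
  let s' := if i ≠ 0 ∧ PySem.Int.mod i 40 = 0 then (0, s.2 ++ [s.1]) else s
  (s'.1 + (PySem.List.pyGetD signal i 0) ^ 2, s'.2)

def AM (signal : List Int) : List Int :=
  let st := (PySem.List.pyRange 0 (signal.length : Int) 1).foldl (AMstep signal) (0, [])
  st.2 ++ [st.1]

-- ===== PORT B =====
-- B's while-loop: while n - start > 40, append the sum of squares of signal[start:start+40]
def AMaltLoop (signal : List Int) (start : Int) (out : List Int) : List Int :=
  if h : (signal.length : Int) - start > 40 then
    AMaltLoop signal (start + 40)
      (out ++ [((PySem.List.slice signal (some start) (some (start + 40))).map (fun x => x * x)).sum])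
  else
    out ++ [((PySem.List.slice signal (some start) none).map (fun x => x * x)).sum]
termination_by ((signal.length : Int) - start).toNat
decreasing_by omega

def AM_alt (signal : List Int) : List Int := AMaltLoop signal 0 []

-- ===== PRECONDITION & SPEC =====
def Spec_AM (signal : List Int) (out : List Int) : Prop := out = AM_alt signal
instance (signal : List Int) (out : List Int) : Decidable (Spec_AM signal out) := by unfold Spec_AM; infer_instance

-- ===== CLAIM (what is proved, stated in full; the proofs are below) =====
def Claim_equal_AM : Prop := ∀ (signal : List Int), Dom_AM signal → Spec_AM signal (AM signal)

-- ===== LEMMAS AND PROOFS =====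

-- reference chunk decomposition: sums of squares of successive 40-chunks (last chunk 1..40, empty list gives [0])
def csum (l : List Int) : List Int :=
  if h : l.length ≤ 40 then [(l.map (fun x => x * x)).sum]
  else ((l.take 40).map (fun x => x * x)).sum :: csum (l.drop 40)
termination_by l.length
decreasing_by simp <;> omega

-- sum of squares over an index segment, as A computes it
def segSum (signal : List Int) (a b : Int) : Int :=
  ((PySem.List.pyRange a b 1).map (fun i => (PySem.List.pyGetD signal i 0) ^ 2)).sum

lemma sq_eq (x : Int) : x ^ 2 = x * x := by ring

-- a run of A's loop over [a, a+n) containing no flush point just accumulates the segment sum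
lemma AM_run (signal : List Int) (n : Nat) : ∀ (a : Int) (c : Int) (out : List Int),
    (∀ k : Nat, k < n → ¬((a + k) ≠ 0 ∧ PySem.Int.mod (a + k) 40 = 0)) →
    (PySem.List.pyRange a (a + n) 1).foldl (AMstep signal) (c, out)
      = (c + segSum signal a (a + n), out) := by
  induction n with
  | zero =>
      intro a c out _
      simp [segSum]
  | succ m ih =>
      intro a c out hno
      have hlt : a < a + (m+1 : Nat) := by push_cast; omega
      rw [PySem.List.pyRange_one_cons hlt]
      simp only [List.foldl_cons]
      have h0 := hno 0 (by omega)
      have hstep : AMstep signal (c, out) a = (c + (PySem.List.pyGetD signal a 0) ^ 2, out) := by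
        unfold AMstep
        rw [if_neg (fun hc => h0 (by simpa using hc))]
      rw [hstep]
      have heq : a + ((m+1 : Nat) : Int) = (a + 1) + (m : Nat) := by push_cast; omega
      rw [heq, ih (a+1) _ out (fun k hk => by
        have := hno (k+1) (by omega)
        intro hc; apply this
        constructor
        · push_cast; omega
        · have : a + 1 + (k : Int) = a + ((k+1 : Nat) : Int) := by push_cast; ring
          rw [← this]; exact hc.2)]
      have hsum : segSum signal a (a + 1 + (m : Nat)) =
          (PySem.List.pyGetD signal a 0) ^ 2 + segSum signal (a + 1) (a + 1 + (m : Nat)) := by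
        rw [segSum, segSum, ← heq, PySem.List.pyRange_one_cons hlt, heq]
        simp
      rw [hsum]
      have : c + (PySem.List.pyGetD signal a 0) ^ 2 + segSum signal (a + 1) (a + 1 + (m : Nat))
          = c + ((PySem.List.pyGetD signal a 0) ^ 2 + segSum signal (a + 1) (a + 1 + (m : Nat))) := by
        ring
      rw [this]

-- the segment sum over in-range indices is the sum of squares of the corresponding sublist
lemma segSum_eq (signal : List Int) (a : Int) (n : Nat) (ha : 0 ≤ a)
    (hb : a + n ≤ (signal.length : Int)) :
    segSum signal a (a + n) = (((signal.drop a.toNat).take n).map (fun x => x * x)).sum := by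
  have h1 : (PySem.List.pyRange a (a + n) 1).map (fun i => PySem.List.pyGetD signal i 0)
      = (signal.drop a.toNat).take n := by
    have hsplit := PySem.List.pyRange_one_append a (a + n) (signal.length : Int)
      (by omega) hb
    have hfull := PySem.List.map_pyGetD_pyRange' signal 0 ha
    rw [hsplit, List.map_append] at hfull
    have hlen : ((PySem.List.pyRange a (a + n) 1).map
        (fun i => PySem.List.pyGetD signal i 0)).length = n := by
      simp [PySem.List.length_pyRange_one]
    have := congrArg (List.take n) hfull
    rw [List.take_append_of_le_length (by omega : n ≤ _)] at this
    · rw [List.take_of_length_le (by omega)] at this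
      exact this
  rw [segSum, ← h1, List.map_map]
  simp [Function.comp_def, sq_eq]

-- A's loop from a flush point a (a > 0, 40 ∣ a) to the end produces the chunk sums of the tail
lemma AM_chunks (signal : List Int) : ∀ (m : Nat) (a : Int), 0 < a → PySem.Int.mod a 40 = 0 →
    0 ≤ a → a + ((signal.length - a.toNat : Nat) : Int) = (signal.length : Int) →
    m = signal.length - a.toNat → 1 ≤ m →
    ∀ (c : Int) (out : List Int),
    (let st := (PySem.List.pyRange a (signal.length : Int) 1).foldl (AMstep signal) (c, out)
     st.2 ++ [st.1]) = out ++ [c] ++ csum (signal.drop a.toNat) := by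
  intro m
  induction m using Nat.strong_induction_on with
  | _ m ih =>
    intro a ha0 hmod ha hab hm hm1 c out
    have h40 : (40 : Int) ∣ a := (PySem.Int.mod_eq_zero_iff_dvd a 40).mp hmod
    by_cases hsmall : m ≤ 40
    · -- single (last) chunk: first index flushes, the rest run without flushing
      have hlt : a < (signal.length : Int) := by omega
      rw [PySem.List.pyRange_one_cons hlt]
      simp only [List.foldl_cons]
      have hstep : AMstep signal (c, out) a
          = ((PySem.List.pyGetD signal a 0) ^ 2, out ++ [c]) := by
        unfold AMstep
        rw [if_pos (⟨by omega, hmod⟩ : a ≠ 0 ∧ PySem.Int.mod a 40 = 0)]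
        simp
      rw [hstep]
      have hlen2 : (signal.length : Int) = (a + 1) + ((m - 1 : Nat) : Int) := by omega
      rw [hlen2, AM_run signal (m-1) (a+1) _ (out ++ [c]) (fun k hk => by
        rintro ⟨hne, hmodk⟩
        have hdvd := (PySem.Int.mod_eq_zero_iff_dvd _ 40).mp hmodk
        obtain ⟨q, hq⟩ := h40; obtain ⟨p, hp⟩ := hdvd
        omega)]
      have hcs : csum (signal.drop a.toNat) = [((signal.drop a.toNat).map (fun x => x * x)).sum] := by
        rw [csum]
        rw [dif_pos (by simp <;> omega)]
      rw [hcs]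
      have hss : (PySem.List.pyGetD signal a 0) ^ 2 + segSum signal (a+1) ((a+1) + ((m-1:Nat):Int))
          = segSum signal a (a + (m : Nat)) := by
        have hcons : PySem.List.pyRange a (a + (m:Nat)) 1
            = a :: PySem.List.pyRange (a+1) (a + (m:Nat)) 1 :=
          PySem.List.pyRange_one_cons (by omega)
        have : (a+1) + ((m-1:Nat):Int) = a + (m:Nat) := by omega
        rw [this, segSum, segSum, hcons]
        simp
      have hseg := segSum_eq signal a m ha (by omega)
      have htk : (signal.drop a.toNat).take m = signal.drop a.toNat :=
        List.take_of_length_le (by simp <;> omega)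
      rw [htk] at hseg
      show (out ++ [c]) ++ [(PySem.List.pyGetD signal a 0) ^ 2
          + segSum signal (a+1) ((a+1) + ((m-1:Nat):Int))]
        = out ++ [c] ++ [(List.map (fun x => x * x) (List.drop a.toNat signal)).sum]
      rw [hss, hseg]
    · -- full chunk [a, a+40) flushes once, then recurse at a+40
      have hsplit := PySem.List.pyRange_one_append a (a + 40) (signal.length : Int)
        (by omega) (by omega)
      rw [hsplit, List.foldl_append]
      have hlt : a < a + 40 := by omega
      rw [PySem.List.pyRange_one_cons hlt]
      simp only [List.foldl_cons]
      have hstep : AMstep signal (c, out) a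
          = ((PySem.List.pyGetD signal a 0) ^ 2, out ++ [c]) := by
        unfold AMstep
        rw [if_pos (⟨by omega, hmod⟩ : a ≠ 0 ∧ PySem.Int.mod a 40 = 0)]
        simp
      rw [hstep]
      have h39 : a + 40 = (a + 1) + ((39 : Nat) : Int) := by push_cast; ring
      rw [h39, AM_run signal 39 (a+1) _ (out ++ [c]) (fun k hk => by
        rintro ⟨hne, hmodk⟩
        have hdvd := (PySem.Int.mod_eq_zero_iff_dvd _ 40).mp hmodk
        obtain ⟨q, hq⟩ := h40; obtain ⟨p, hp⟩ := hdvd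
        omega)]
      -- recurse
      have hmod' : PySem.Int.mod (a + 40) 40 = 0 := by
        rw [PySem.Int.mod_eq_zero_iff_dvd]
        exact dvd_add h40 (dvd_refl 40)
      rw [← h39]
      have hrec := ih (m - 40) (by omega) (a + 40) (by omega) hmod' (by omega)
        (by push_cast; omega) (by omega) (by omega)
        ((PySem.List.pyGetD signal a 0) ^ 2 + segSum signal (a+1) (a + 40))
        (out ++ [c])
      simp only at hrec
      rw [hrec]
      -- identify the head value with the first chunk's sum of squares
      have hss : (PySem.List.pyGetD signal a 0) ^ 2 + segSum signal (a+1) (a + 40)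
          = segSum signal a (a + 40) := by
        rw [segSum, segSum, PySem.List.pyRange_one_cons (by omega : a < a + 40)]
        simp
      have hseg := segSum_eq signal a 40 ha (by push_cast; omega)
      have hcast : a + ((40:Nat):Int) = a + 40 := by norm_num
      rw [hcast] at hseg
      rw [hss, hseg]
      have hdropdrop : signal.drop (a + 40).toNat = (signal.drop a.toNat).drop 40 := by
        rw [List.drop_drop]
        congr 1
        omega
      have hcs : csum (signal.drop a.toNat)
          = (((signal.drop a.toNat).take 40).map (fun x => x * x)).sum
              :: csum ((signal.drop a.toNat).drop 40) := by
        rw [csum, dif_neg (by simp <;> omega)]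
      rw [hdropdrop, hcs]
      simp

-- A computes the chunk decomposition
lemma AM_eq_csum (signal : List Int) : AM signal = csum signal := by
  by_cases hlen : signal.length ≤ 40
  · -- single chunk, no flush ever fires
    rw [AM]
    have h0 : PySem.List.pyRange 0 (signal.length : Int) 1
        = PySem.List.pyRange 0 ((0:Int) + ((signal.length : Nat) : Int)) 1 := by norm_num
    rw [h0]
    rw [AM_run signal signal.length 0 0 [] (fun k hk => by
      rintro ⟨hne, hmodk⟩
      have hdvd := (PySem.Int.mod_eq_zero_iff_dvd _ 40).mp hmodk
      obtain ⟨p, hp⟩ := hdvd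
      simp at hne
      omega)]
    have hseg := segSum_eq signal 0 signal.length le_rfl (by omega)
    simp only [zero_add] at hseg ⊢
    rw [hseg]
    rw [csum, dif_pos hlen]
    simp [List.take_of_length_le (le_refl signal.length)]
  · -- at least one full chunk then the tail
    rw [AM]
    have hsplit := PySem.List.pyRange_one_append 0 40 (signal.length : Int)
      (by omega) (by omega)
    simp only [hsplit, List.foldl_append]
    have h40 : (40 : Int) = (0:Int) + ((40 : Nat) : Int) := by norm_num
    rw [show PySem.List.pyRange 0 40 1 = PySem.List.pyRange 0 (0 + ((40:Nat):Int)) 1 by norm_num]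
    rw [AM_run signal 40 0 0 [] (fun k hk => by
      rintro ⟨hne, hmodk⟩
      have hdvd := (PySem.Int.mod_eq_zero_iff_dvd _ 40).mp hmodk
      obtain ⟨p, hp⟩ := hdvd
      simp at hne
      omega)]
    have hchunks := AM_chunks signal (signal.length - 40) 40 (by omega)
      (by decide) (by omega)
      (by push_cast; omega) (by simp <;> omega) (by omega)
      (0 + segSum signal 0 (0 + ((40:Nat):Int))) []
    simp only at hchunks
    rw [hchunks]
    have hseg := segSum_eq signal 0 40 le_rfl (by omega)
    simp only [zero_add] at hseg
    have hcsig : csum signal = ((signal.take 40).map (fun x => x * x)).sum :: csum (signal.drop 40) := by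
      rw [csum, dif_neg hlen]
    rw [hcsig]
    simp only [Int.toNat_zero, List.drop_zero, Nat.cast_ofNat] at hseg
    simp [hseg, ← List.map_take]

-- B's loop appends exactly the chunk sums of the remaining tail
lemma AMaltLoop_eq (signal : List Int) : ∀ (m : Nat) (start : Int), 0 ≤ start →
    m = signal.length - start.toNat → ∀ (out : List Int),
    AMaltLoop signal start out = out ++ csum (signal.drop start.toNat) := by
  intro m
  induction m using Nat.strong_induction_on with
  | _ m ih =>
    intro start hs hm out
    rw [AMaltLoop]
    by_cases hc : (signal.length : Int) - start > 40
    · rw [dif_pos hc]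
      have hto : (start + 40).toNat = start.toNat + 40 := by omega
      have hslice : PySem.List.slice signal (some start) (some (start + 40))
          = (signal.drop start.toNat).take 40 := by
        rw [PySem.List.slice_toNat signal hs (by omega)]
        congr 1
        omega
      have hrec := ih (m - 40) (by omega) (start + 40) (by omega) (by omega)
        (out ++ [((PySem.List.slice signal (some start) (some (start + 40))).map
          (fun x => x * x)).sum])
      rw [hrec]
      have hdd : signal.drop (start + 40).toNat = (signal.drop start.toNat).drop 40 := by
        rw [List.drop_drop]; congr 1 <;> omega
      have hcs : csum (signal.drop start.toNat)
          = (((signal.drop start.toNat).take 40).map (fun x => x * x)).sum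
              :: csum ((signal.drop start.toNat).drop 40) := by
        rw [csum, dif_neg (by simp <;> omega)]
      rw [hdd, hcs, hslice]
      simp
    · rw [dif_neg hc]
      rw [PySem.List.slice_from signal hs]
      have hcs : csum (signal.drop start.toNat)
          = [((signal.drop start.toNat).map (fun x => x * x)).sum] := by
        rw [csum, dif_pos (by simp <;> omega)]
      rw [hcs]

lemma AM_alt_eq_csum (signal : List Int) : AM_alt signal = csum signal := by
  rw [AM_alt, AMaltLoop_eq signal signal.length 0 le_rfl (by simp) []]
  simp

-- ===== VERDICT (by name: the statement is the Claim_ definition above) =====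
theorem AM_spec : Claim_equal_AM := by
  intro signal _
  unfold Spec_AM
  rw [AM_eq_csum, AM_alt_eq_csum]
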